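-- pv_equiv track=rewrite | github.com/kasraRf/game-theory | main.py | horizontal_woman_best_response
-- ===== SOURCE A (Python) =====
-- def horizontal_woman_best_response(woman_good_matrix,woman_bad_matrix):
--      best_response_matrix=[]
--      for i in range(2):
--             if woman_good_matrix[i][0]>woman_good_matrix[i][1]:
--                 if woman_bad_matrix[i][0]>woman_bad_matrix[i][1]:
--                     best_response_matrix.append(['BB'])
--                 elif woman_bad_matrix[i][0]<woman_bad_matrix[i][1]:
--                     best_response_matrix.append(['BS'])
--                 else:
--                     best_response_matrix.append(['BB','BS'])
--             elif woman_good_matrix[i][0]<woman_good_matrix[i][1]: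
--                 if woman_bad_matrix[i][0]>woman_bad_matrix[i][1]:
--                     best_response_matrix.append(['SB'])
--                 elif woman_bad_matrix[i][0]<woman_bad_matrix[i][1]:
--                     best_response_matrix.append(['SS'])
--                 else :
--                     best_response_matrix.append(['SB','SS'])
--             else:
--                 if woman_bad_matrix[i][0]>woman_bad_matrix[i][1]:
--                     best_response_matrix.append(['BB','SB'])
--                 elif woman_bad_matrix[i][0]<woman_bad_matrix[i][1]:
--                     best_response_matrix.append(['BS','SS'])
--                 else:
--                     best_response_matrix.append(['BB','BS','SB','SS'])
--      return best_response_matrix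
-- ===== SOURCE B (Python) =====
-- def horizontal_woman_best_response(woman_good_matrix, woman_bad_matrix):
--     def winners(row):
--         m = max(row[0], row[1])
--         return [L for L, v in zip('BS', row[:2]) if v == m]
--     return [[x + y
--              for x in winners(woman_good_matrix[i])
--              for y in winners(woman_bad_matrix[i])]
--             for i in range(2)]
-- ===== Notes on version B (the rewrite author's own statement) =====
-- stated objective: simpler
-- what changed: Instead of enumerating nine comparison cases, B computes for each row the argmax letters ('B'/'S' positions achieving max(row[0],row[1])) and builds each label list as the cartesian product of the good-row winners with the bad-row winners.
import Mathlib
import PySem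

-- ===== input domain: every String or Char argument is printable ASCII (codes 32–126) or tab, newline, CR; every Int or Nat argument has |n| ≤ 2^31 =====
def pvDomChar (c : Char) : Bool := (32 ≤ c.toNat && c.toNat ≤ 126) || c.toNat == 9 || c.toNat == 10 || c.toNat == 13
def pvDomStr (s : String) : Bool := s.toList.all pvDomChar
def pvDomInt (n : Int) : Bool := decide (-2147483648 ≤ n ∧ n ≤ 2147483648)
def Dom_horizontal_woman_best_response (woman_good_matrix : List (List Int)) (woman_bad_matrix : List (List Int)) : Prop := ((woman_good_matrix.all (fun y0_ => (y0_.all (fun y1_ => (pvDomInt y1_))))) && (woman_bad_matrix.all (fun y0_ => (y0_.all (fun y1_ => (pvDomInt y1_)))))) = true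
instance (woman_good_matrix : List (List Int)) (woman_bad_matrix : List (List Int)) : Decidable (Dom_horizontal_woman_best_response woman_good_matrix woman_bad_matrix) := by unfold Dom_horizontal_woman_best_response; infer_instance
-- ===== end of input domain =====

set_option maxHeartbeats 1000000


-- B replaces A's nine-way nested if/elif tree by computing, per row, the argmax
-- letters ('B'/'S' positions achieving max(row[0],row[1])) and building each label
-- list as the cartesian product good-winners × bad-winners (simpler).

-- ===== PORT A =====
-- m[i][j] for nonnegative literal indices; Pre_ keeps the indices in range,
-- so List.getD here is exact (Python would raise IndexError outside Pre_).
def pvAIdx (m : List (List Int)) (i j : Nat) : Int := (m.getD i []).getD j 0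

def horizontal_woman_best_response (woman_good_matrix : List (List Int)) (woman_bad_matrix : List (List Int)) : List (List String) :=
  (List.range 2).foldl (fun best_response_matrix i =>
    if pvAIdx woman_good_matrix i 0 > pvAIdx woman_good_matrix i 1 then
      if pvAIdx woman_bad_matrix i 0 > pvAIdx woman_bad_matrix i 1 then
        best_response_matrix ++ [["BB"]]
      else if pvAIdx woman_bad_matrix i 0 < pvAIdx woman_bad_matrix i 1 then
        best_response_matrix ++ [["BS"]]
      else
        best_response_matrix ++ [["BB", "BS"]]
    else if pvAIdx woman_good_matrix i 0 < pvAIdx woman_good_matrix i 1 then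
      if pvAIdx woman_bad_matrix i 0 > pvAIdx woman_bad_matrix i 1 then
        best_response_matrix ++ [["SB"]]
      else if pvAIdx woman_bad_matrix i 0 < pvAIdx woman_bad_matrix i 1 then
        best_response_matrix ++ [["SS"]]
      else
        best_response_matrix ++ [["SB", "SS"]]
    else
      if pvAIdx woman_bad_matrix i 0 > pvAIdx woman_bad_matrix i 1 then
        best_response_matrix ++ [["BB", "SB"]]
      else if pvAIdx woman_bad_matrix i 0 < pvAIdx woman_bad_matrix i 1 then
        best_response_matrix ++ [["BS", "SS"]]
      else
        best_response_matrix ++ [["BB", "BS", "SB", "SS"]]) []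

-- ===== PORT B =====
-- winners(row): letters of zip('BS', row[:2]) whose value equals max(row[0],row[1]);
-- row[0]/row[1] are in range inside Pre_, so getD is exact.
def pvWinners (row : List Int) : List String :=
  let m := max (row.getD 0 0) (row.getD 1 0)
  ((["B", "S"].zip (PySem.List.slice row none (some 2))).filter (fun p => p.2 == m)).map
    (fun p => p.1)

def horizontal_woman_best_response_alt (woman_good_matrix : List (List Int)) (woman_bad_matrix : List (List Int)) : List (List String) :=
  (List.range 2).map (fun i =>
    (pvWinners (woman_good_matrix.getD i [])).flatMap (fun x =>
      (pvWinners (woman_bad_matrix.getD i [])).map (fun y => x ++ y)))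

-- ===== PRECONDITION & SPEC =====
-- Pre_ excludes exactly the inputs on which Python A raises IndexError: a matrix with
-- fewer than 2 rows, or a row 0/1 with fewer than 2 entries.
def Pre_horizontal_woman_best_response (woman_good_matrix : List (List Int)) (woman_bad_matrix : List (List Int)) : Prop :=
  2 ≤ woman_good_matrix.length ∧ 2 ≤ woman_bad_matrix.length ∧
  (∀ i < 2, 2 ≤ (woman_good_matrix.getD i []).length ∧ 2 ≤ (woman_bad_matrix.getD i []).length)
instance (woman_good_matrix : List (List Int)) (woman_bad_matrix : List (List Int)) : Decidable (Pre_horizontal_woman_best_response woman_good_matrix woman_bad_matrix) := by unfold Pre_horizontal_woman_best_response; infer_instance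

def pvWitness_horizontal_woman_best_response : List (List Int) × List (List Int) :=
  ([[1, 2], [3, 3]], [[5, 4], [0, 0]])

def Spec_horizontal_woman_best_response (woman_good_matrix : List (List Int)) (woman_bad_matrix : List (List Int)) (out : List (List String)) : Prop := out = horizontal_woman_best_response_alt woman_good_matrix woman_bad_matrix
instance (woman_good_matrix : List (List Int)) (woman_bad_matrix : List (List Int)) (out : List (List String)) : Decidable (Spec_horizontal_woman_best_response woman_good_matrix woman_bad_matrix out) := by unfold Spec_horizontal_woman_best_response; infer_instance

-- ===== CLAIM (what is proved, stated in full; the proofs are below) =====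
def Claim_equal_horizontal_woman_best_response : Prop := ∀ (woman_good_matrix : List (List Int)) (woman_bad_matrix : List (List Int)), Dom_horizontal_woman_best_response woman_good_matrix woman_bad_matrix → Pre_horizontal_woman_best_response woman_good_matrix woman_bad_matrix → Spec_horizontal_woman_best_response woman_good_matrix woman_bad_matrix (horizontal_woman_best_response woman_good_matrix woman_bad_matrix)

-- ===== LEMMAS AND PROOFS =====
lemma pvTake2 (x y : Int) (t : List Int) :
    PySem.List.slice (x :: y :: t) none (some 2) = [x, y] := by
  simp [PySem.List.slice]

lemma pvWinners_gt (a b : Int) (t : List Int) (h : a > b) :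
    pvWinners (a :: b :: t) = ["B"] := by
  have hb : (b == a) = false := by simp; omega
  simp [pvWinners, pvTake2, max_eq_left h.le, List.filter, hb]

lemma pvWinners_lt (a b : Int) (t : List Int) (h : a < b) :
    pvWinners (a :: b :: t) = ["S"] := by
  have ha : (a == b) = false := by simp; omega
  simp [pvWinners, pvTake2, max_eq_right h.le, List.filter, ha]

lemma pvWinners_eq (a b : Int) (t : List Int) (h : a = b) :
    pvWinners (a :: b :: t) = ["B", "S"] := by
  subst h
  simp [pvWinners, pvTake2, List.filter]

lemma pvRow (a0 a1 : Int) (gt : List Int) (d0 d1 : Int) (bt : List Int) :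
    (pvWinners (a0 :: a1 :: gt)).flatMap (fun x => (pvWinners (d0 :: d1 :: bt)).map (fun y => x ++ y)) =
    (if a0 > a1 then
       if d0 > d1 then ["BB"] else if d0 < d1 then ["BS"] else ["BB", "BS"]
     else if a0 < a1 then
       if d0 > d1 then ["SB"] else if d0 < d1 then ["SS"] else ["SB", "SS"]
     else
       if d0 > d1 then ["BB", "SB"] else if d0 < d1 then ["BS", "SS"] else ["BB", "BS", "SB", "SS"]) := by
  rcases lt_trichotomy a0 a1 with h1 | h1 | h1 <;>
    rcases lt_trichotomy d0 d1 with h2 | h2 | h2 <;>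
    rw [show pvWinners (a0 :: a1 :: gt) = _ from by
          first | exact pvWinners_lt _ _ _ h1 | exact pvWinners_eq _ _ _ h1 | exact pvWinners_gt _ _ _ h1,
        show pvWinners (d0 :: d1 :: bt) = _ from by
          first | exact pvWinners_lt _ _ _ h2 | exact pvWinners_eq _ _ _ h2 | exact pvWinners_gt _ _ _ h2] <;>
    split_ifs <;> first | rfl | (exfalso; omega)

-- ===== VERDICT (by name: the statement is the Claim_ definition above) =====
theorem horizontal_woman_best_response_spec : Claim_equal_horizontal_woman_best_response := by
  intro wg wb _ hpre
  obtain ⟨hg, hb, hrows⟩ := hpre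
  obtain ⟨hg0, hb0⟩ := hrows 0 (by omega)
  obtain ⟨hg1, hb1⟩ := hrows 1 (by omega)
  match wg, wb, hg, hb with
  | g0 :: g1 :: _, b0 :: b1 :: _, _, _ =>
    simp only [List.getD, List.getElem?_cons_zero, List.getElem?_cons_succ, Option.getD_some] at hg0 hg1 hb0 hb1
    match g0, g1, b0, b1, hg0, hg1, hb0, hb1 with
    | a0 :: a1 :: _, c0 :: c1 :: _, d0 :: d1 :: _, e0 :: e1 :: _, _, _, _, _ =>
      show _ = _
      simp only [horizontal_woman_best_response, horizontal_woman_best_response_alt, pvAIdx,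
        List.range_succ, List.range_zero, List.nil_append, List.foldl_append,
        List.foldl_cons, List.foldl_nil, List.map_append, List.map_cons, List.map_nil,
        List.getD, List.getElem?_cons_zero, List.getElem?_cons_succ, Option.getD_some,
        pvRow]
      split_ifs <;> rfl
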